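-- pv_equiv track=rewrite | github.com/cry999/AtCoder | beginner/098/B.py | cut_and_count
-- ===== SOURCE A (Python) =====
-- def cut_and_count(N: int, S: str) -> int:
--     l, r = {}, {}
--     for c in S:
--         if c not in r:
--             r[c] = 1
--         else:
--             r[c] += 1
--
--     max_len = 0
--     for c in S:
--         if c not in l:
--             l[c] = 1
--         else:
--             l[c] += 1
--         r[c] -= 1
--
--         ls = set(k for k, v in l.items() if v > 0)
--         rs = set(k for k, v in r.items() if v > 0)
--
--         temp = len(ls & rs)
--         max_len = max(max_len, temp)
--
--     return max_len
-- ===== SOURCE B (Python) =====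
-- def cut_and_count(N: int, S: str) -> int:
--     best = 0
--     for i in range(1, len(S)):
--         best = max(best, len(set(S[:i]) & set(S[i:])))
--     return best
-- ===== Notes on version B (the rewrite author's own statement) =====
-- stated objective: simpler
-- what changed: Drops both incrementally-maintained count dictionaries and their per-step positive-key scans: B just loops over each split point and directly recomputes the distinct-character sets of the two slices S[:i] and S[i:], taking the running maximum of their intersection size.
import Mathlib
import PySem

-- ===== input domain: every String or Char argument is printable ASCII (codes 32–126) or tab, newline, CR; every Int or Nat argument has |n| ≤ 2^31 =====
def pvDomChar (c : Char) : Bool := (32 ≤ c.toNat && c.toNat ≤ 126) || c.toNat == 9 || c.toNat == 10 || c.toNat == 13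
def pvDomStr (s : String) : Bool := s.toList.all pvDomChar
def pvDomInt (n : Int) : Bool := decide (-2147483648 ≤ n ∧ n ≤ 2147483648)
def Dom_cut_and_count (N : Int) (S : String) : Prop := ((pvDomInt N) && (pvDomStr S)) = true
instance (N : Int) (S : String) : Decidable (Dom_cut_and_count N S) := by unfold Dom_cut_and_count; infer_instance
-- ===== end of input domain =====

-- B replaces A's incrementally-maintained count dictionaries by a direct per-split
-- recomputation of the two distinct-character sets from slices (simpler; same behaviour).

-- ===== PORT A =====
-- 'if c not in d: d[c] = 1 else: d[c] += 1' (the pattern A uses for both dicts)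
def pvBump (d : PySem.Dict Char Int) (c : Char) : PySem.Dict Char Int :=
  if d.contains c = false then d.insert c 1 else d.insert c (d.getD c 0 + 1)

-- 'set(k for k, v in d.items() if v > 0)'
def pvPosKeys (d : PySem.Dict Char Int) : PySem.Set Char :=
  PySem.Set.ofList ((d.items.filter (fun kv => decide (0 < kv.2))).map Prod.fst)

def cut_and_count (N : Int) (S : String) : Int :=
  let r0 := S.toList.foldl pvBump PySem.Dict.empty
  let st := S.toList.foldl
    (fun (st : PySem.Dict Char Int × PySem.Dict Char Int × Int) c =>
      let l := pvBump st.1 c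
      -- 'r[c] -= 1': c is always a key of r here (r counted every char of S), so no KeyError
      let r := st.2.1.insert c (st.2.1.getD c 0 - 1)
      let ls := pvPosKeys l
      let rs := pvPosKeys r
      let temp := PySem.Set.len (PySem.Set.inter ls rs)
      (l, r, max st.2.2 temp))
    (PySem.Dict.empty, r0, 0)
  st.2.2

-- ===== PORT B =====
def cut_and_count_alt (N : Int) (S : String) : Int :=
  (PySem.List.pyRange 1 (PySem.Str.len S) 1).foldl
    (fun best i =>
      let left := PySem.Set.ofList (PySem.List.slice S.toList none (some i))
      let right := PySem.Set.ofList (PySem.List.slice S.toList (some i) none)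
      max best (PySem.Set.len (PySem.Set.inter left right)))
    0

-- ===== PRECONDITION & SPEC =====
def Spec_cut_and_count (N : Int) (S : String) (out : Int) : Prop := out = cut_and_count_alt N S
instance (N : Int) (S : String) (out : Int) : Decidable (Spec_cut_and_count N S out) := by unfold Spec_cut_and_count; infer_instance

-- ===== CLAIM (what is proved, stated in full; the proofs are below) =====
def Claim_equal_cut_and_count : Prop := ∀ (N : Int) (S : String), Dom_cut_and_count N S → Spec_cut_and_count N S (cut_and_count N S)

-- ===== LEMMAS AND PROOFS =====

-- the common per-split quantity: |set(s[:i]) ∩ set(s[i:])|  (B's shape)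
def pvT (s : List Char) (i : Nat) : Int :=
  PySem.Set.len (PySem.Set.inter (PySem.Set.ofList (s.take i)) (PySem.Set.ofList (s.drop i)))

-- the r-dict after the whole of s has been counted and the prefix q has been decremented
def pvRSpec (s q : List Char) : PySem.Dict Char Int :=
  PySem.Dict.mk ((PySem.Set.ofList s).map (fun k => (k, (s.count k : Int) - q.count k)))

theorem pvBump_eq : pvBump = fun d c => d.insert c (d.getD c 0 + 1) := by
  funext d c
  by_cases h : d.contains c = true
  · simp [pvBump, h]
  · simp only [Bool.not_eq_true] at h
    simp [pvBump, h, PySem.Dict.getD_of_not_contains d 0 h]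

theorem pvBump_counter (q : List Char) (c : Char) :
    pvBump (PySem.Dict.counter q) c = PySem.Dict.counter (q ++ [c]) := by
  rw [pvBump_eq, ← PySem.Dict.foldl_insert_getD_add_one_eq_counter q,
      ← PySem.Dict.foldl_insert_getD_add_one_eq_counter (q ++ [c]), List.foldl_append]
  rfl

theorem pvRSpec_nil (s : List Char) : PySem.Dict.counter s = pvRSpec s [] := by
  apply PySem.Dict.ext
  rw [PySem.Dict.items_counter]
  unfold pvRSpec
  apply List.map_congr_left
  intro k _
  simp

theorem pvRSpec_keys_nodup (s q : List Char) : (pvRSpec s q).keys.Nodup := by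
  have : (pvRSpec s q).keys = PySem.Set.ofList s := by
    unfold pvRSpec
    rw [PySem.Dict.keys_mk, List.map_map]
    have hid : ((fun x : Char × Int => x.1) ∘ fun k => (k, (s.count k : Int) - q.count k)) = id := by
      funext k; rfl
    rw [hid, List.map_id]
  rw [this]; exact PySem.Set.nodup_ofList s

theorem pvRSpec_step (s q : List Char) (c : Char) (hc : c ∈ s) :
    (pvRSpec s q).insert c ((pvRSpec s q).getD c 0 - 1) = pvRSpec s (q ++ [c]) := by
  have hmem : (c, (s.count c : Int) - q.count c) ∈ (pvRSpec s q).items := by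
    simp only [pvRSpec]
    exact List.mem_map.mpr ⟨c, (PySem.Set.mem_ofList s c).mpr hc, rfl⟩
  have hget : (pvRSpec s q).getD c 0 = (s.count c : Int) - q.count c :=
    PySem.Dict.getD_of_mem_items _ hmem (pvRSpec_keys_nodup s q) 0
  have hcont : (pvRSpec s q).contains c = true := by
    rw [PySem.Dict.contains_iff_mem_keys]
    simp [pvRSpec, PySem.Dict.keys_mk, PySem.Set.mem_ofList, hc]
  apply PySem.Dict.ext
  rw [PySem.Dict.items_insert_of_contains _ _ hcont, hget]
  simp only [pvRSpec, List.map_map]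
  apply List.map_congr_left
  intro k _
  by_cases hk : k = c
  · subst hk
    simp [List.count_append]
    omega
  · have hc1 : List.count k [c] = 0 := by
      simp [List.count_singleton]
      exact fun h => absurd h.symm hk
    simp [hk, List.count_append, hc1]

theorem pvPosKeys_counter (q : List Char) : pvPosKeys (PySem.Dict.counter q) = PySem.Set.ofList q := by
  unfold pvPosKeys
  rw [PySem.Dict.items_counter]
  have hall : ∀ kv ∈ (PySem.Set.ofList q).map (fun k => (k, (q.count k : Int))),
      (decide (0 < kv.2)) = true := by
    intro kv hkv
    obtain ⟨k, hk, rfl⟩ := List.mem_map.mp hkv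
    have : k ∈ q := (PySem.Set.mem_ofList q k).mp hk
    simp only [decide_eq_true_eq]
    exact_mod_cast List.count_pos_iff.mpr this
  rw [List.filter_eq_self.mpr hall, List.map_map]
  have hid : ((Prod.fst : Char × Int → Char) ∘ fun k => (k, (q.count k : Int))) = id := by
    funext k; rfl
  rw [hid, List.map_id]
  exact PySem.Set.ofList_eq_self_of_nodup _ (PySem.Set.nodup_ofList q)

theorem pvPosKeys_rSpec (q rest : List Char) :
    pvPosKeys (pvRSpec (q ++ rest) q) =
      (PySem.Set.ofList (q ++ rest)).filter (fun k => decide (k ∈ rest)) := by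
  unfold pvPosKeys pvRSpec
  rw [List.filter_map, List.map_map]
  have h1 : List.filter ((fun kv : Char × Int => decide (0 < kv.2)) ∘
      (fun k => (k, ((q ++ rest).count k : Int) - q.count k))) (PySem.Set.ofList (q ++ rest))
      = List.filter (fun k => decide (k ∈ rest)) (PySem.Set.ofList (q ++ rest)) := by
    apply List.filter_congr
    intro k _
    simp only [Function.comp, List.count_append, decide_eq_decide]
    push_cast
    constructor
    · intro h
      by_contra hk
      have : rest.count k = 0 := List.count_eq_zero.mpr hk
      omega
    · intro h
      have : 0 < rest.count k := List.count_pos_iff.mpr h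
      omega
  rw [h1]
  have hid : (Prod.fst ∘ (fun k => (k, ((q ++ rest).count k : Int) - q.count k))) = id := by
    funext k; rfl
  rw [hid, List.map_id]
  exact PySem.Set.ofList_eq_self_of_nodup _ ((PySem.Set.nodup_ofList _).filter _)

-- A's per-step temp equals pvT
theorem pvTemp_eq (q rest : List Char) :
    PySem.Set.len (PySem.Set.inter (PySem.Set.ofList q)
      ((PySem.Set.ofList (q ++ rest)).filter (fun k => decide (k ∈ rest)))) =
    PySem.Set.len (PySem.Set.inter (PySem.Set.ofList q) (PySem.Set.ofList rest)) := by
  unfold PySem.Set.len PySem.Set.inter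
  congr 1
  refine congrArg List.length (List.filter_congr ?_)
  intro k _
  rw [Bool.eq_iff_iff, PySem.Set.contains_iff, PySem.Set.contains_iff]
  simp only [List.mem_filter, PySem.Set.mem_ofList, List.mem_append, decide_eq_true_eq]
  constructor
  · rintro ⟨_, h⟩; exact h
  · intro h; exact ⟨Or.inr h, h⟩

-- the loop body of A's second loop
def pvStepA (st : PySem.Dict Char Int × PySem.Dict Char Int × Int) (c : Char) :
    PySem.Dict Char Int × PySem.Dict Char Int × Int :=
  let l := pvBump st.1 c
  let r := st.2.1.insert c (st.2.1.getD c 0 - 1)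
  let ls := pvPosKeys l
  let rs := pvPosKeys r
  let temp := PySem.Set.len (PySem.Set.inter ls rs)
  (l, r, max st.2.2 temp)

theorem pvFoldA (rest : List Char) : ∀ (q : List Char) (best : Int),
    (rest.foldl pvStepA (PySem.Dict.counter q, pvRSpec (q ++ rest) q, best)).2.2
    = List.foldl (fun b j => max b (pvT (q ++ rest) (q.length + 1 + j))) best
        (List.range rest.length) := by
  induction rest with
  | nil => intro q best; simp
  | cons c t ih =>
    intro q best
    have hstep : pvStepA (PySem.Dict.counter q, pvRSpec (q ++ c :: t) q, best) c
        = (PySem.Dict.counter (q ++ [c]), pvRSpec (q ++ c :: t) (q ++ [c]),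
           max best (pvT (q ++ c :: t) (q.length + 1))) := by
      unfold pvStepA
      simp only
      rw [pvBump_counter, pvRSpec_step _ _ _ (by simp), pvPosKeys_counter]
      have hqc : q ++ c :: t = (q ++ [c]) ++ t := by simp
      rw [hqc, pvPosKeys_rSpec (q ++ [c]) t, pvTemp_eq (q ++ [c]) t]
      unfold pvT
      rw [List.take_left' (by simp), List.drop_left' (by simp)]
    rw [List.foldl_cons, hstep]
    have hq : q ++ c :: t = (q ++ [c]) ++ t := by simp
    rw [hq]
    rw [ih (q ++ [c]) (max best (pvT ((q ++ [c]) ++ t) (q.length + 1)))]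
    simp only [List.length_cons, List.range_succ_eq_map, List.foldl_cons, List.foldl_map,
      List.length_append, List.length_cons, List.length_nil, Nat.add_zero]
    apply PySem.List.foldl_congr_mem
    intro b j _
    congr 2
    omega

theorem pvA_closed (N : Int) (S : String) :
    cut_and_count N S
    = List.foldl (fun b j => max b (pvT S.toList (1 + j))) 0 (List.range S.toList.length) := by
  unfold cut_and_count
  simp only
  have h0 : S.toList.foldl pvBump PySem.Dict.empty = pvRSpec S.toList [] := by
    rw [pvBump_eq, PySem.Dict.foldl_insert_getD_add_one_eq_counter, pvRSpec_nil]
  have hstep : (fun (st : PySem.Dict Char Int × PySem.Dict Char Int × Int) c =>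
      let l := pvBump st.1 c
      let r := st.2.1.insert c (st.2.1.getD c 0 - 1)
      let ls := pvPosKeys l
      let rs := pvPosKeys r
      let temp := PySem.Set.len (PySem.Set.inter ls rs)
      (l, r, max st.2.2 temp)) = pvStepA := rfl
  rw [h0, hstep]
  have := pvFoldA S.toList [] 0
  simp only [List.nil_append, List.length_nil, Nat.zero_add] at this
  have hcnt : PySem.Dict.counter ([] : List Char) = PySem.Dict.empty := rfl
  rw [← hcnt]
  exact this

theorem pvB_closed (N : Int) (S : String) :
    cut_and_count_alt N S
    = List.foldl (fun b j => max b (pvT S.toList (1 + j))) 0 (List.range (S.toList.length - 1)) := by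
  unfold cut_and_count_alt
  have hlen : PySem.Str.len S = (S.toList.length : Int) := by
    simp [PySem.Str.len_eq]
  rw [hlen, PySem.List.pyRange_one, List.foldl_map]
  have hn : ((S.toList.length : Int) - 1).toNat = S.toList.length - 1 := by omega
  rw [hn]
  apply PySem.List.foldl_congr_mem
  intro b j hj
  have hj' : (1 + (j : Int)) = ((1 + j : Nat) : Int) := by push_cast; ring
  simp only
  rw [hj', PySem.List.slice_to_natCast, PySem.List.slice_from_natCast]
  rfl

theorem pvT_last (s : List Char) : pvT s s.length = 0 := by
  unfold pvT
  rw [List.drop_length]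
  simp [PySem.Set.len, PySem.Set.inter, PySem.Set.ofList, PySem.Set.empty]

theorem pv_main (s : List Char) :
    List.foldl (fun b j => max b (pvT s (1 + j))) 0 (List.range s.length)
    = List.foldl (fun b j => max b (pvT s (1 + j))) 0 (List.range (s.length - 1)) := by
  cases hn : s.length with
  | zero => simp
  | succ m =>
    have : List.range (m + 1) = List.range m ++ [m] := List.range_succ
    rw [this, List.foldl_append]
    simp only [List.foldl_cons, List.foldl_nil, Nat.add_sub_cancel]
    have hlast : pvT s (1 + m) = 0 := by
      have : 1 + m = s.length := by omega
      rw [this, pvT_last]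
    rw [hlast]
    have hnn := (PySem.List.le_foldl_max_int (List.range m) (fun j => pvT s (1 + j)) 0).1
    omega

-- ===== VERDICT (by name: the statement is the Claim_ definition above) =====
theorem cut_and_count_spec : Claim_equal_cut_and_count := by
  intro N S _
  show cut_and_count N S = cut_and_count_alt N S
  rw [pvA_closed, pvB_closed, pv_main]
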